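-- pv_equiv track=rewrite | github.com/QingQueFans/qingque_moveit | moveit_core/planning_scene/unified_tools/src/ps_tools/wizard.py | parse_selection_with_map
-- ===== SOURCE A (Python) =====
-- from typing import List, Dict, Any, Optional, Union
--
-- def parse_selection_with_map(selection: str, display_map: Dict[int, str]) -> List[str]:
--     """使用显示映射解析用户选择 - 确保ID干净"""
--     selection = selection.strip().lower()
--
--     if selection == 'all':
--         return list(display_map.values())
--
--     selected = []
--
--     # 处理范围选择
--     if '-' in selection and selection.count('-') == 1:
--         try:
--             start_str, end_str = selection.split('-')
--             start = int(start_str.strip())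
--             end = int(end_str.strip())
--
--             for i in range(start, end + 1):
--                 if i in display_map:
--                     # 🆕 确保提取干净的ID
--                     obj_id = display_map[i]
--                     if ' (' in obj_id:
--                         obj_id = obj_id.split(' (')[0].strip()
--                     selected.append(obj_id)
--             return selected
--         except:
--             pass
--
--     # 处理多个数字选择
--     try:
--         indices = [int(idx.strip()) for idx in selection.split()]
--         for idx in indices:
--             if idx in display_map:
--                 obj_id = display_map[idx]
--                 if ' (' in obj_id:
--                     obj_id = obj_id.split(' (')[0].strip()
--                 selected.append(obj_id)
--         return selected
--     except:
--         pass
--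
--     return []
-- ===== SOURCE B (Python) =====
-- def _select_keys(s, cleaned):
--     if '-' in s and s.count('-') == 1:
--         a, b = s.split('-')
--         try:
--             lo, hi = int(a.strip()), int(b.strip())
--         except ValueError:
--             pass
--         else:
--             return sorted(k for k in cleaned if lo <= k <= hi)
--     try:
--         return [i for i in (int(t.strip()) for t in s.split()) if i in cleaned]
--     except ValueError:
--         return []
--
--
-- def parse_selection_with_map(selection, display_map):
--     s = selection.strip().lower()
--     if s == 'all':
--         return list(display_map.values())
--     cleaned = {k: (v.split(' (')[0].strip() if ' (' in v else v)
--                for k, v in display_map.items()}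
--     return [cleaned[k] for k in _select_keys(s, cleaned)]
-- ===== Notes on version B (the rewrite author's own statement) =====
-- stated objective: alternative
-- what changed: B is staged instead of interleaved: it first builds a dict of already-cleaned IDs in one pass over the map, then computes the selected key list separately (for a range 'a-b' it filters the dict's keys to [a,b] and sorts them instead of A's scan over every integer from a to b, which cleans inline while appending), and finally maps the keys through the cleaned dict; it trades A's range scan for a key sort and an upfront cleaning pass.
import Mathlib
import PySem

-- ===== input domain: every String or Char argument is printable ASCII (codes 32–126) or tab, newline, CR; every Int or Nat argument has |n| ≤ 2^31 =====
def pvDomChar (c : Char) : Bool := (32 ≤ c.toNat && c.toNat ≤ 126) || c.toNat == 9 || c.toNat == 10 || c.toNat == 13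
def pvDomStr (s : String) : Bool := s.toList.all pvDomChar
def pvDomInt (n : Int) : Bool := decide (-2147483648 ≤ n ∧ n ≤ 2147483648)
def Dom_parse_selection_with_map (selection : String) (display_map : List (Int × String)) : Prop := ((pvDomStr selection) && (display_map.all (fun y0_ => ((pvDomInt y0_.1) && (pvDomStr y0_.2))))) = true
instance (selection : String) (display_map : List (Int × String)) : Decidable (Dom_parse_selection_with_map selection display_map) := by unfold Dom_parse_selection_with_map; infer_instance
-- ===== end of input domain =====

-- B is staged instead of interleaved: it builds a dict of already-cleaned IDs in one
-- pass, computes the selected key list separately (for a range 'a-b': filter-and-sort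
-- the map's keys instead of A's scan over every integer of the range), then maps the
-- keys through the cleaned dict (objective: alternative).

-- ===== PORT A =====
-- 'obj_id.split(" (")[0].strip() if " (" in obj_id else obj_id'
def pvCleanA (v : String) : String :=
  if PySem.Str.isIn " (" v then
    PySem.Str.strip (PySem.List.pyGetD ((PySem.Str.split? v " (").getD []) 0 "")
  else v

-- A's final try-block: parse every whitespace-separated token, on failure return [].
def pvMultiA (s : String) (d : PySem.Dict Int String) : List String :=
  match (PySem.Str.split₀ s).mapM (fun t => PySem.Int.ofStr? (PySem.Str.strip t)) with
  | some indices =>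
      indices.foldl (fun acc idx =>
        if d.contains idx then acc ++ [pvCleanA (d.getD idx "")] else acc) []
  | none => []

-- A's body after 'selection = selection.strip().lower()'
def pvBodyA (s : String) (d : PySem.Dict Int String) : List String :=
  if s == "all" then d.values
  else if PySem.Str.isIn "-" s && (PySem.Str.count s "-" == 1) then
    match PySem.Str.split? s "-" with
    | some [start_str, end_str] =>
      match PySem.Int.ofStr? (PySem.Str.strip start_str),
            PySem.Int.ofStr? (PySem.Str.strip end_str) with
      | some start, some e =>
          (PySem.List.pyRange start (e + 1)).foldl (fun acc i =>
            if d.contains i then acc ++ [pvCleanA (d.getD i "")] else acc) []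
      | _, _ => pvMultiA s d        -- int() raised: fall through to the second try-block
    | _ => pvMultiA s d             -- tuple unpack raised (unreachable when count = 1)
  else pvMultiA s d

def parse_selection_with_map (selection : String) (display_map : List (Int × String)) : List String :=
  pvBodyA (PySem.Str.lower (PySem.Str.strip selection)) (PySem.Dict.ofList display_map)

-- ===== PORT B =====
-- 'cleaned = {k: (v.split(" (")[0].strip() if " (" in v else v) for k, v in display_map.items()}'
def pvCleaned (display_map : List (Int × String)) : PySem.Dict Int String :=
  PySem.Dict.ofList ((PySem.Dict.ofList display_map).items.map (fun p =>
    (p.1, if PySem.Str.isIn " (" p.2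
          then PySem.Str.strip (PySem.List.pyGetD ((PySem.Str.split? p.2 " (").getD []) 0 "")
          else p.2)))

-- '_select_keys(s, cleaned)'
def pvMultiKeysB (s : String) (cleaned : PySem.Dict Int String) : List Int :=
  match (PySem.Str.split₀ s).mapM (fun t => PySem.Int.ofStr? (PySem.Str.strip t)) with
  | some is => is.filter (fun i => cleaned.contains i)
  | none => []

def pvSelectKeysB (s : String) (cleaned : PySem.Dict Int String) : List Int :=
  if PySem.Str.isIn "-" s && (PySem.Str.count s "-" == 1) then
    match PySem.Str.split? s "-" with
    | some [a, b] =>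
      match PySem.Int.ofStr? (PySem.Str.strip a), PySem.Int.ofStr? (PySem.Str.strip b) with
      | some lo, some hi =>
          PySem.List.sorted (cleaned.keys.filter (fun k => decide (lo ≤ k) && decide (k ≤ hi)))
            (fun k => k)
      | _, _ => pvMultiKeysB s cleaned
    | _ => pvMultiKeysB s cleaned
  else pvMultiKeysB s cleaned

def pvBodyB (s : String) (display_map : List (Int × String)) : List String :=
  if s == "all" then (PySem.Dict.ofList display_map).values
  else (pvSelectKeysB s (pvCleaned display_map)).map (fun k => (pvCleaned display_map).getD k "")

def parse_selection_with_map_alt (selection : String) (display_map : List (Int × String)) : List String :=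
  pvBodyB (PySem.Str.lower (PySem.Str.strip selection)) display_map

-- ===== PRECONDITION & SPEC =====
def Spec_parse_selection_with_map (selection : String) (display_map : List (Int × String)) (out : List String) : Prop := out = parse_selection_with_map_alt selection display_map
instance (selection : String) (display_map : List (Int × String)) (out : List String) : Decidable (Spec_parse_selection_with_map selection display_map out) := by unfold Spec_parse_selection_with_map; infer_instance

-- ===== CLAIM =====
def Claim_equal_parse_selection_with_map : Prop := ∀ (selection : String) (display_map : List (Int × String)), Dom_parse_selection_with_map selection display_map → Spec_parse_selection_with_map selection display_map (parse_selection_with_map selection display_map)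

-- ===== LEMMAS AND PROOFS =====

theorem pvCleaned_items (m : List (Int × String)) :
    (pvCleaned m).items
      = (PySem.Dict.ofList m).items.map (fun p => (p.1, pvCleanA p.2)) := by
  unfold pvCleaned
  have h := PySem.Dict.items_foldl_insert_fresh
    ((PySem.Dict.ofList m).items.map (fun p => (p.1, pvCleanA p.2)))
    (fun a => a.1) (fun a => a.2) PySem.Dict.empty
    (by intro a _; exact PySem.Dict.contains_empty _)
    (by
      have : ((PySem.Dict.ofList m).items.map (fun p => (p.1, pvCleanA p.2))).map
          (fun a => a.1) = (PySem.Dict.ofList m).keys := by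
        simp only [List.map_map, PySem.Dict.keys]; rfl
      rw [this]; exact PySem.Dict.nodup_keys_ofList m)
  simpa using h

theorem pvCleaned_keys (m : List (Int × String)) :
    (pvCleaned m).keys = (PySem.Dict.ofList m).keys := by
  simp only [PySem.Dict.keys, pvCleaned_items, List.map_map]; rfl

theorem pvCleaned_nodup (m : List (Int × String)) : (pvCleaned m).keys.Nodup := by
  rw [pvCleaned_keys]; exact PySem.Dict.nodup_keys_ofList m

theorem pvCleaned_contains (m : List (Int × String)) (k : Int) :
    (pvCleaned m).contains k = (PySem.Dict.ofList m).contains k := by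
  rw [PySem.Dict.contains_eq_decide_mem_keys, PySem.Dict.contains_eq_decide_mem_keys,
    pvCleaned_keys]

theorem pvCleaned_getD (m : List (Int × String)) (k : Int)
    (hk : k ∈ (PySem.Dict.ofList m).keys) :
    (pvCleaned m).getD k "" = pvCleanA ((PySem.Dict.ofList m).getD k "") := by
  have : k ∈ (PySem.Dict.ofList m).items.map (fun p => p.1) := hk
  obtain ⟨p, hp, hpk⟩ := List.mem_map.mp this
  have hv : (PySem.Dict.ofList m).getD k "" = p.2 := by
    cases p
    exact PySem.Dict.getD_of_mem_items _ (hpk ▸ hp) (PySem.Dict.nodup_keys_ofList m) ""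
  have hc : (k, pvCleanA p.2) ∈ (pvCleaned m).items := by
    rw [pvCleaned_items]
    exact List.mem_map.mpr ⟨p, hp, by rw [hpk]⟩
  rw [PySem.Dict.getD_of_mem_items _ hc (pvCleaned_nodup m) "", hv]

theorem pvMulti_eq (s : String) (m : List (Int × String)) :
    pvMultiA s (PySem.Dict.ofList m)
      = (pvMultiKeysB s (pvCleaned m)).map (fun k => (pvCleaned m).getD k "") := by
  unfold pvMultiA pvMultiKeysB
  cases (PySem.Str.split₀ s).mapM (fun t => PySem.Int.ofStr? (PySem.Str.strip t)) with
  | none => rfl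
  | some indices =>
      dsimp only
      rw [PySem.List.foldl_append_if (fun i => (PySem.Dict.ofList m).contains i)
        (fun i => pvCleanA ((PySem.Dict.ofList m).getD i ""))]
      simp only [List.nil_append]
      have hf : indices.filter (fun i => (pvCleaned m).contains i)
          = indices.filter (fun i => (PySem.Dict.ofList m).contains i) := by
        exact List.filter_congr (fun i _ => pvCleaned_contains m i)
      rw [hf]
      refine List.map_congr_left (fun i hi => ?_)
      have hc := (List.mem_filter.mp hi).2
      exact (pvCleaned_getD m i ((PySem.Dict.contains_iff_mem_keys _ _).mp hc)).symm

theorem pvRange_eq (m : List (Int × String)) (lo hi : Int) :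
    (PySem.List.pyRange lo (hi + 1)).foldl (fun acc i =>
        if (PySem.Dict.ofList m).contains i
        then acc ++ [pvCleanA ((PySem.Dict.ofList m).getD i "")] else acc) []
    = (PySem.List.sorted ((pvCleaned m).keys.filter
          (fun k => decide (lo ≤ k) && decide (k ≤ hi))) (fun k => k)).map
        (fun k => (pvCleaned m).getD k "") := by
  rw [PySem.List.foldl_append_if (fun i => (PySem.Dict.ofList m).contains i)
    (fun i => pvCleanA ((PySem.Dict.ofList m).getD i ""))]
  simp only [List.nil_append]
  rw [pvCleaned_keys]
  have hnd := PySem.Dict.nodup_keys_ofList m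
  have hsorted : PySem.List.sorted
      ((PySem.Dict.ofList m).keys.filter (fun k => decide (lo ≤ k) && decide (k ≤ hi)))
      (fun k => k)
      = (PySem.List.pyRange lo (hi + 1)).filter
          (fun i => (PySem.Dict.ofList m).contains i) := by
    apply PySem.List.sorted_eq_of_perm_of_pairwise_lt
    · rw [List.perm_ext_iff_of_nodup
        ((PySem.List.nodup_pyRange_one lo (hi + 1)).filter _) (hnd.filter _)]
      intro x
      simp only [List.mem_filter, PySem.List.mem_pyRange_one, Bool.and_eq_true,
        decide_eq_true_eq, PySem.Dict.contains_iff_mem_keys]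
      constructor
      · rintro ⟨⟨h1, h2⟩, h3⟩; exact ⟨h3, h1, by omega⟩
      · rintro ⟨h3, h1, h2⟩; exact ⟨⟨h1, by omega⟩, h3⟩
    · exact (PySem.List.pairwise_lt_pyRange_one lo (hi + 1)).filter _
  rw [hsorted]
  refine (List.map_congr_left (fun i hi => ?_)).symm
  have hc := (List.mem_filter.mp hi).2
  exact pvCleaned_getD m i ((PySem.Dict.contains_iff_mem_keys _ _).mp hc)

theorem pvBody_eq (s : String) (m : List (Int × String)) :
    pvBodyA s (PySem.Dict.ofList m) = pvBodyB s m := by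
  unfold pvBodyA pvBodyB pvSelectKeysB
  by_cases hall : (s == "all") = true
  · simp only [hall, if_true]
  · simp only [Bool.not_eq_true] at hall
    simp only [hall, Bool.false_eq_true, if_false]
    by_cases hr : (PySem.Str.isIn "-" s && (PySem.Str.count s "-" == 1)) = true
    · simp only [hr, if_true]
      generalize PySem.Str.split? s "-" = o
      rcases o with _ | ⟨_ | ⟨a, _ | ⟨b, _ | ⟨c, l⟩⟩⟩⟩
      · dsimp only; exact pvMulti_eq s m
      · dsimp only; exact pvMulti_eq s m
      · dsimp only; exact pvMulti_eq s m
      · dsimp only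
        generalize PySem.Int.ofStr? (PySem.Str.strip a) = o1
        generalize PySem.Int.ofStr? (PySem.Str.strip b) = o2
        rcases o1 with _ | lo
        · dsimp only; exact pvMulti_eq s m
        · rcases o2 with _ | hi
          · dsimp only; exact pvMulti_eq s m
          · dsimp only; exact pvRange_eq m lo hi
      · dsimp only; exact pvMulti_eq s m
    · simp only [Bool.not_eq_true] at hr
      simp only [hr, Bool.false_eq_true, if_false]
      exact pvMulti_eq s m

-- ===== VERDICT =====
theorem parse_selection_with_map_spec : Claim_equal_parse_selection_with_map := by
  intro selection display_map _
  exact pvBody_eq _ display_map
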